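-- pv_equiv track=rewrite | github.com/FuryMartin/Picf | utils/display_by_person.py | sort_by_person
-- ===== SOURCE A (Python) =====
-- def sort_by_person(images):
--     #输入[{"person":name,"pic_name":path}]形式的列表，返回{name:[paths]}形式的字典
--     persons = {}
--     for image in images:
--         path = image['pic_name']
--         name = image['person']
--         if name not in persons:
--             persons[name] = []
--         persons[name].append(path)
--     return persons
-- ===== SOURCE B (Python) =====
-- def sort_by_person(images):
--     # Idiomatic two-pass version: collect the distinct names in first-occurrence
--     # order, then gather each name's paths with one comprehension per name.
--     names = dict.fromkeys(image['person'] for image in images)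
--     return {name: [image['pic_name'] for image in images if image['person'] == name]
--             for name in names}
-- ===== Notes on version B (the rewrite author's own statement) =====
-- stated objective: idiomatic
-- what changed: A threads one mutable dict through a single loop (setdefault-style insert then append); B instead deduplicates the names with dict.fromkeys and builds the result as a dict comprehension with one filtering pass per distinct name.
import Mathlib
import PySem

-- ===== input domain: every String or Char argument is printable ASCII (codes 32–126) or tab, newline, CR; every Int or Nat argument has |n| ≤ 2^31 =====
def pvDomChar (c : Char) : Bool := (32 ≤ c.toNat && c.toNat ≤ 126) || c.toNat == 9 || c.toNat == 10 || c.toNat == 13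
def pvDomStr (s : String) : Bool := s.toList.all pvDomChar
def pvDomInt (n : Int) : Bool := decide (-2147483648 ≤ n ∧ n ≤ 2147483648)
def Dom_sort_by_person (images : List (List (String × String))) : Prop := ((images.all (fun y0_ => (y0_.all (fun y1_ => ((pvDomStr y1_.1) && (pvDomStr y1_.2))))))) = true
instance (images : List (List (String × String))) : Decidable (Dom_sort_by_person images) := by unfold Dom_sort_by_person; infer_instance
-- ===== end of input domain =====

-- B groups by two passes (distinct names, then one filtering scan per name) instead of
-- threading one mutable dict through a single loop; same result, idiomatic, not faster.

-- image[k]: first-match lookup in the association list (Python dict access)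
def pvLookup (image : List (String × String)) (k : String) : Option String :=
  (image.find? (fun p => p.1 == k)).map (·.2)

-- ===== PORT A =====
def sort_by_person (images : List (List (String × String))) : List (String × List String) :=
  (images.foldl (fun persons image =>
      let path := (pvLookup image "pic_name").getD ""   -- KeyError excluded by Pre_
      let name := (pvLookup image "person").getD ""
      let persons := if persons.contains name then persons else persons.insert name []
      persons.modify name [] (· ++ [path]))
    PySem.Dict.empty).items

-- ===== PORT B =====
def sort_by_person_alt (images : List (List (String × String))) : List (String × List String) :=
  let names := PySem.Set.ofList (images.map (fun image => (pvLookup image "person").getD ""))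
  names.map (fun n =>
    (n, (images.filter (fun image => (pvLookup image "person").getD "" == n)).map
          (fun image => (pvLookup image "pic_name").getD "")))

-- ===== PRECONDITION & SPEC =====
-- Pre_ excludes exactly the images missing a 'person' or 'pic_name' key, on which A raises KeyError.
def Pre_sort_by_person (images : List (List (String × String))) : Prop :=
  ∀ image ∈ images, (pvLookup image "person").isSome ∧ (pvLookup image "pic_name").isSome
instance (images : List (List (String × String))) : Decidable (Pre_sort_by_person images) := by unfold Pre_sort_by_person; infer_instance
def pvWitness_sort_by_person : (List (List (String × String))) :=
  [[("person", "alice"), ("pic_name", "a.jpg")], [("person", "bob"), ("pic_name", "b.jpg")], [("person", "alice"), ("pic_name", "c.jpg")]]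

def Spec_sort_by_person (images : List (List (String × String))) (out : List (String × List String)) : Prop := out = sort_by_person_alt images
instance (images : List (List (String × String))) (out : List (String × List String)) : Decidable (Spec_sort_by_person images out) := by unfold Spec_sort_by_person; infer_instance

-- ===== CLAIM (what is proved, stated in full; the proofs are below) =====
def Claim_equal_sort_by_person : Prop := ∀ (images : List (List (String × String))), Dom_sort_by_person images → Pre_sort_by_person images → Spec_sort_by_person images (sort_by_person images)

-- ===== LEMMAS AND PROOFS =====

def pvName (image : List (String × String)) : String := (pvLookup image "person").getD ""
def pvPath (image : List (String × String)) : String := (pvLookup image "pic_name").getD ""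

-- A's loop body is exactly one 'modify' (the setdefault branch is absorbed by modify's default)
theorem pvBody_eq_modify (d : PySem.Dict String (List String)) (k : String) (v : String) :
    (if d.contains k then d else d.insert k []).modify k [] (· ++ [v])
      = d.modify k [] (· ++ [v]) := by
  by_cases h : d.contains k
  · simp [h]
  · simp only [h, Bool.false_eq_true, if_false, PySem.Dict.modify,
      PySem.Dict.getD_insert_self, PySem.Dict.insert_insert_self,
      PySem.Dict.getD_of_not_contains d [] (by simpa using h)]

-- A's whole loop, as a single-modify fold over the (name, path) pairs
theorem pvA_eq_pairs_fold (images : List (List (String × String))) :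
    sort_by_person images =
      ((images.map (fun image => (pvName image, pvPath image))).foldl
        (fun d p => d.modify p.1 [] (· ++ [p.2])) PySem.Dict.empty).items := by
  unfold sort_by_person
  rw [List.foldl_map]
  congr 2
  funext d image
  exact pvBody_eq_modify d (pvName image) (pvPath image)

theorem sort_by_person_spec : Claim_equal_sort_by_person := by
  intro images _ _
  unfold Spec_sort_by_person sort_by_person_alt
  rw [pvA_eq_pairs_fold]
  have hnd : ((images.map (fun image => (pvName image, pvPath image))).foldl
      (fun d p => d.modify p.1 [] (· ++ [p.2])) PySem.Dict.empty).keys.Nodup := by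
    exact PySem.Dict.nodup_keys_foldl_modify_key _ Prod.fst [] (fun _ p v => v ++ [p.2]) _
      (by simp [PySem.Dict.keys_empty])
  rw [PySem.Dict.items_eq_map_keys _ hnd []]
  have hkeys : ((images.map (fun image => (pvName image, pvPath image))).foldl
      (fun d p => d.modify p.1 [] (· ++ [p.2])) PySem.Dict.empty).keys
      = PySem.Set.ofList (images.map (fun image => (pvLookup image "person").getD "")) := by
    rw [PySem.Dict.keys_foldl_modify_key _ Prod.fst [] (fun _ p v => v ++ [p.2])]
    simp [PySem.Dict.keys_empty, PySem.Set.update_nil_left, List.map_map, pvName, Function.comp_def]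
  rw [hkeys]
  refine List.map_congr_left (fun n _ => ?_)
  rw [PySem.Dict.getD_foldl_modify_append, PySem.Dict.getD_empty, List.filter_map, List.map_map]
  simp [pvName, pvPath, Function.comp_def]
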